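-- pv_equiv track=rewrite | github.com/hu6r1s/Problem-Solving | 프로그래머스/2/42584. 주식가격/주식가격.py | solution
-- ===== SOURCE A (Python) =====
-- from collections import deque
--
-- def solution(prices):
--     queue = deque(prices)
--     result = []
--
--     while queue:
--         q = queue.popleft()
--         count = 0
--         for i in queue:
--             count += 1
--             if q > i:
--                 break
--         result.append(count)
--     return result
-- ===== SOURCE B (Python) =====
-- def solution(prices):
--     n = len(prices)
--     answer = [0] * n
--     stack = []  # indices whose price has not dropped yet; prices non-decreasing bottom-to-top... (non-increasing toward bottom)
--     for j, p in enumerate(prices):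
--         while stack and p < prices[stack[-1]]:
--             i = stack.pop()
--             answer[i] = j - i
--         stack.append(j)
--     for i in stack:
--         answer[i] = n - 1 - i
--     return answer
-- ===== Notes on version B (the rewrite author's own statement) =====
-- stated objective: faster
-- what changed: Replaced the O(n^2) per-element forward scan over the remaining deque with a single left-to-right pass using a monotonic stack of unresolved indices, resolving each index when a lower price arrives and finishing the survivors at the end.
import Mathlib
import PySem

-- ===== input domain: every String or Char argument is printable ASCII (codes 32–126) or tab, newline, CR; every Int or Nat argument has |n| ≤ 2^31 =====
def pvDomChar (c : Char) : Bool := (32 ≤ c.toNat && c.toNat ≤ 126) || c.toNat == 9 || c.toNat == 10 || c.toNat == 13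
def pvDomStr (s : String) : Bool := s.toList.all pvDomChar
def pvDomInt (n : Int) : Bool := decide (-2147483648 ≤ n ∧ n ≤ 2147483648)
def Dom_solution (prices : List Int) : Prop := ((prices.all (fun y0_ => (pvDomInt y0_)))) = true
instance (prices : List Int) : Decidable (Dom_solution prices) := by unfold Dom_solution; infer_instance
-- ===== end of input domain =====

-- B replaces A's quadratic rescans of the remaining deque by a one-pass monotonic stack of
-- unresolved indices (objective: faster).

-- ===== PORT A =====
-- inner 'for i in queue: count += 1; if q > i: break'
def pvInnerCount (q : Int) : List Int → Int
  | [] => 0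
  | i :: t => if q > i then 1 else 1 + pvInnerCount q t

-- 'while queue: q = queue.popleft(); ...; result.append(count)'
def solution : List Int → List Int
  | [] => []
  | q :: rest => pvInnerCount q rest :: solution rest

-- ===== PORT B =====
-- 'prices[i]' for a stacked index i (always in range, so getD is exact)
def pvGet (prices : List Int) (i : Nat) : Int := prices.getD i 0

-- 'while stack and p < prices[stack[-1]]: i = stack.pop(); answer[i] = j - i'
-- (stack stored top-first: Python's append/pop at the right end become cons/tail)
def pvPopDrop (prices : List Int) (p : Int) (j : Nat) : List Nat → List Int → List Nat × List Int
  | [], ans => ([], ans)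
  | i :: st, ans =>
    if p < pvGet prices i then pvPopDrop prices p j st (ans.set i ((j : Int) - (i : Int)))
    else (i :: st, ans)

-- 'for j, p in enumerate(prices)': recursion over prices carrying the index j
def pvMainLoop (prices : List Int) : List Int → Nat → List Nat → List Int → List Nat × List Int
  | [], _, st, ans => (st, ans)
  | p :: rest, j, st, ans =>
    let (st', ans') := pvPopDrop prices p j st ans
    pvMainLoop prices rest (j + 1) (j :: st') ans'

def solution_alt (prices : List Int) : List Int :=
  let n := prices.length
  let (st, ans) := pvMainLoop prices prices 0 [] (List.replicate n 0)
  st.foldl (fun a i => a.set i ((n : Int) - 1 - (i : Int))) ans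

-- ===== PRECONDITION & SPEC =====
def Spec_solution (prices : List Int) (out : List Int) : Prop := out = solution_alt prices
instance (prices : List Int) (out : List Int) : Decidable (Spec_solution prices out) := by unfold Spec_solution; infer_instance

-- ===== CLAIM (what is proved, stated in full; the proofs are below) =====
def Claim_equal_solution : Prop := ∀ (prices : List Int), Dom_solution prices → Spec_solution prices (solution prices)

-- ===== LEMMAS AND PROOFS =====

-- the value A produces for index i
def pvVal (prices : List Int) (i : Nat) : Int :=
  pvInnerCount (pvGet prices i) (prices.drop (i + 1))

-- 'index i has not yet seen a strictly smaller price among indices i+1..j-1'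
def pvOk (prices : List Int) (i j : Nat) : Bool :=
  ((prices.drop (i + 1)).take (j - (i + 1))).all (fun x => pvGet prices i ≤ x)

def pvStackSpec (prices : List Int) (j : Nat) : List Nat :=
  ((List.range j).filter (fun i => pvOk prices i j)).reverse

def pvAnsSpec (prices : List Int) (j : Nat) : List Int :=
  (List.range prices.length).map
    (fun i => if i < j ∧ pvOk prices i j = false then pvVal prices i else 0)

theorem pvListExt (l1 l2 : List Int) (hlen : l1.length = l2.length)
    (h : ∀ k, k < l1.length → l1.getD k 0 = l2.getD k 0) : l1 = l2 := by
  apply List.ext_getElem hlen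
  intro k h1 h2
  have hk := h k h1
  rwa [List.getD_eq_getElem?_getD, List.getD_eq_getElem?_getD,
    List.getElem?_eq_getElem h1, List.getElem?_eq_getElem h2] at hk

theorem pvInnerCount_all_le (q : Int) (l : List Int) (h : ∀ x ∈ l, q ≤ x) :
    pvInnerCount q l = (l.length : Int) := by
  induction l with
  | nil => simp [pvInnerCount]
  | cons x t ih =>
    have hx := h x (by simp)
    have hnx : ¬ q > x := by omega
    simp [pvInnerCount, hnx, ih (fun y hy => h y (by simp [hy]))]
    omega

theorem pvInnerCount_break (q x : Int) (l1 l2 : List Int)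
    (h1 : ∀ y ∈ l1, q ≤ y) (hx : x < q) :
    pvInnerCount q (l1 ++ x :: l2) = (l1.length : Int) + 1 := by
  induction l1 with
  | nil => simp [pvInnerCount, hx]
  | cons y t ih =>
    have hy := h1 y (by simp)
    have hny : ¬ q > y := by omega
    simp [pvInnerCount, hny, ih (fun z hz => h1 z (by simp [hz]))]
    omega

theorem pvDrop_getElem? (prices : List Int) (i k : Nat) (hik : i < k) (hk : k < prices.length) :
    (prices.drop (i + 1))[k - (i + 1)]? = some (pvGet prices k) := by
  rw [List.getElem?_drop]
  have he : i + 1 + (k - (i + 1)) = k := by omega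
  rw [he, List.getElem?_eq_getElem hk]
  simp [pvGet, List.getD_eq_getElem?_getD, List.getElem?_eq_getElem hk]

theorem pvOk_le (prices : List Int) (i j k : Nat) (hok : pvOk prices i j = true)
    (hik : i < k) (hkj : k < j) (hk : k < prices.length) :
    pvGet prices i ≤ pvGet prices k := by
  have hlen : k - (i + 1) < ((prices.drop (i + 1)).take (j - (i + 1))).length := by
    rw [List.length_take, List.length_drop]; omega
  have hval : ((prices.drop (i + 1)).take (j - (i + 1)))[k - (i + 1)]'hlen = pvGet prices k := by
    rw [List.getElem_take]
    have h1 := pvDrop_getElem? prices i k hik hk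
    rw [List.getElem?_eq_getElem (by rw [List.length_drop]; omega)] at h1
    exact Option.some.inj h1
  have hmem : pvGet prices k ∈ (prices.drop (i + 1)).take (j - (i + 1)) :=
    hval ▸ List.getElem_mem hlen
  exact of_decide_eq_true (List.all_eq_true.mp hok _ hmem)

theorem pvOk_succ (prices : List Int) (i j : Nat) (hij : i < j) (hj : j < prices.length) :
    pvOk prices i (j + 1) = (pvOk prices i j && decide (pvGet prices i ≤ pvGet prices j)) := by
  unfold pvOk
  have h1 : j + 1 - (i + 1) = (j - (i + 1)) + 1 := by omega
  rw [h1, List.take_succ, pvDrop_getElem? prices i j hij hj]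
  simp [List.all_append]

theorem pvPopDrop_spec (prices : List Int) (p : Int) (j : Nat) (L : List Nat) (ans : List Int)
    (hpw : L.Pairwise (fun a b => pvGet prices b ≤ pvGet prices a)) :
    pvPopDrop prices p j L ans =
      (L.filter (fun i => !(decide (p < pvGet prices i))),
       (L.filter (fun i => decide (p < pvGet prices i))).foldl
         (fun a i => a.set i ((j : Int) - (i : Int))) ans) := by
  induction L generalizing ans with
  | nil => simp [pvPopDrop]
  | cons i t ih =>
    rcases List.pairwise_cons.mp hpw with ⟨hhead, htail⟩
    by_cases hp : p < pvGet prices i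
    · rw [List.filter_cons_of_neg (by simp [hp]), List.filter_cons_of_pos (by simp [hp]),
        List.foldl_cons]
      have hstep : pvPopDrop prices p j (i :: t) ans =
          pvPopDrop prices p j t (ans.set i ((j : Int) - (i : Int))) := by
        simp only [pvPopDrop]
        rw [if_pos hp]
      rw [hstep]
      exact ih _ htail
    · have hkeep : ∀ b ∈ t, ¬ p < pvGet prices b := by
        intro b hb
        have := hhead b hb
        omega
      have hf1 : List.filter (fun i => !(decide (p < pvGet prices i))) (i :: t) = i :: t := by
        rw [List.filter_cons_of_pos (by simp [hp])]
        congr 1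
        exact List.filter_eq_self.mpr (fun b hb => by simpa using hkeep b hb)
      have hf2 : List.filter (fun i => decide (p < pvGet prices i)) (i :: t) = [] := by
        apply List.filter_eq_nil_iff.mpr
        intro b hb
        rcases List.mem_cons.mp hb with h | h
        · subst h; simpa using hp
        · simpa using hkeep b h
      have hstop : pvPopDrop prices p j (i :: t) ans = (i :: t, ans) := by
        simp only [pvPopDrop]
        rw [if_neg hp]
      rw [hstop, hf1, hf2]
      rfl

theorem pvSetFold_length (f : Nat → Int) (L : List Nat) (ans : List Int) :
    (L.foldl (fun a i => a.set i (f i)) ans).length = ans.length := by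
  induction L generalizing ans with
  | nil => rfl
  | cons i t ih => simp [List.foldl_cons, ih]

theorem pvSetFold_getD (f : Nat → Int) (L : List Nat) (ans : List Int) (k : Nat)
    (hk : k < ans.length) :
    (L.foldl (fun a i => a.set i (f i)) ans).getD k 0 =
      if k ∈ L then f k else ans.getD k 0 := by
  induction L generalizing ans with
  | nil => simp
  | cons i t ih =>
    rw [List.foldl_cons, ih _ (by simp [hk])]
    by_cases hkt : k ∈ t
    · simp [hkt]
    · by_cases hki : k = i
      · subst hki
        simp [hkt, List.getD_eq_getElem?_getD, List.getElem?_set_self (by omega), hk]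
      · simp [hkt, hki, List.getD_eq_getElem?_getD, List.getElem?_set_ne (fun h => hki h.symm)]

theorem pvStackSpec_mem (prices : List Int) (j i : Nat) :
    i ∈ pvStackSpec prices j ↔ i < j ∧ pvOk prices i j = true := by
  simp [pvStackSpec, List.mem_filter, List.mem_range]

theorem pvStackSpec_pairwise (prices : List Int) (j : Nat) (hj : j ≤ prices.length) :
    (pvStackSpec prices j).Pairwise (fun a b => pvGet prices b ≤ pvGet prices a) := by
  have h1 : ((List.range j).filter (fun i => pvOk prices i j)).Pairwise (· < ·) :=
    List.Pairwise.sublist List.filter_sublist List.pairwise_lt_range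
  have h2 : (pvStackSpec prices j).Pairwise (fun a b => b < a) := by
    unfold pvStackSpec
    exact List.pairwise_reverse.mpr h1
  refine List.Pairwise.imp_of_mem ?_ h2
  intro a b ha hb hab
  rw [pvStackSpec_mem] at ha hb
  exact pvOk_le prices b j a hb.2 hab ha.1 (lt_of_lt_of_le ha.1 hj)

theorem pvAnsSpec_length (prices : List Int) (j : Nat) :
    (pvAnsSpec prices j).length = prices.length := by
  simp [pvAnsSpec]

theorem pvAnsSpec_getD (prices : List Int) (j k : Nat) (hk : k < prices.length) :
    (pvAnsSpec prices j).getD k 0 =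
      if k < j ∧ pvOk prices k j = false then pvVal prices k else 0 := by
  unfold pvAnsSpec
  rw [List.getD_eq_getElem?_getD, List.getElem?_eq_getElem (by simpa using hk)]
  simp

theorem pvVal_resolved (prices : List Int) (j k : Nat) (hkj : k < j) (hj : j < prices.length)
    (hok : pvOk prices k j = true) (hlt : pvGet prices j < pvGet prices k) :
    pvVal prices k = (j : Int) - (k : Int) := by
  unfold pvVal
  have hm : j - (k + 1) < (prices.drop (k + 1)).length := by
    rw [List.length_drop]; omega
  have hdecomp : prices.drop (k + 1) =
      (prices.drop (k + 1)).take (j - (k + 1)) ++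
        (prices.drop (k + 1))[j - (k + 1)] :: (prices.drop (k + 1)).drop (j - (k + 1) + 1) := by
    conv_lhs => rw [← List.take_append_drop (j - (k + 1)) (prices.drop (k + 1))]
    rw [List.drop_eq_getElem_cons hm]
  have hgj : (prices.drop (k + 1))[j - (k + 1)] = pvGet prices j := by
    have h1 := pvDrop_getElem? prices k j hkj hj
    rw [List.getElem?_eq_getElem hm] at h1
    exact Option.some.inj h1
  have hall : ∀ y ∈ (prices.drop (k + 1)).take (j - (k + 1)), pvGet prices k ≤ y := by
    intro y hy
    exact of_decide_eq_true (List.all_eq_true.mp hok _ hy)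
  rw [hdecomp, hgj, pvInnerCount_break _ _ _ _ hall hlt]
  have hlt2 : ((prices.drop (k + 1)).take (j - (k + 1))).length = j - (k + 1) := by
    rw [List.length_take, List.length_drop]; omega
  rw [hlt2]
  omega

theorem pvVal_unresolved (prices : List Int) (k : Nat) (hk : k < prices.length)
    (hok : pvOk prices k prices.length = true) :
    pvVal prices k = (prices.length : Int) - 1 - (k : Int) := by
  unfold pvVal
  have hslen : (prices.drop (k + 1)).length = prices.length - (k + 1) := by simp
  have htake : (prices.drop (k + 1)).take (prices.length - (k + 1)) = prices.drop (k + 1) := by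
    rw [← hslen]; exact List.take_length
  have hall : ∀ x ∈ prices.drop (k + 1), pvGet prices k ≤ x := by
    intro x hx
    have hx2 : x ∈ (prices.drop (k + 1)).take (prices.length - (k + 1)) := by
      rw [htake]; exact hx
    exact of_decide_eq_true (List.all_eq_true.mp hok _ hx2)
  rw [pvInnerCount_all_le _ _ hall, hslen]
  omega

theorem pvStackSpec_succ (prices : List Int) (j : Nat) (hj : j < prices.length) :
    pvStackSpec prices (j + 1) =
      j :: (pvStackSpec prices j).filter (fun i => !(decide (pvGet prices j < pvGet prices i))) := by
  have hokjj : pvOk prices j (j + 1) = true := by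
    unfold pvOk
    simp
  unfold pvStackSpec
  rw [List.range_succ, List.filter_append, List.filter_cons_of_pos (by simp [hokjj])]
  have hcong : (List.range j).filter (fun i => pvOk prices i (j + 1)) =
      ((List.range j).filter (fun i => pvOk prices i j)).filter
        (fun i => !(decide (pvGet prices j < pvGet prices i))) := by
    rw [List.filter_filter]
    apply List.filter_congr
    intro i hi
    have hij : i < j := List.mem_range.mp hi
    rw [pvOk_succ prices i j hij hj]
    cases h1 : pvOk prices i j <;> by_cases h2 : pvGet prices i ≤ pvGet prices j <;>
      simp [h2] <;> omega
  rw [hcong, List.filter_reverse]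
  simp

theorem pvAnsSpec_succ (prices : List Int) (j : Nat) (hj : j < prices.length) :
    ((pvStackSpec prices j).filter (fun i => decide (pvGet prices j < pvGet prices i))).foldl
        (fun a i => a.set i ((j : Int) - (i : Int))) (pvAnsSpec prices j) =
      pvAnsSpec prices (j + 1) := by
  apply pvListExt
  · rw [pvSetFold_length, pvAnsSpec_length, pvAnsSpec_length]
  · intro k hk
    rw [pvSetFold_length, pvAnsSpec_length] at hk
    rw [pvSetFold_getD _ _ _ _ (by rw [pvAnsSpec_length]; exact hk),
      pvAnsSpec_getD _ _ _ hk, pvAnsSpec_getD _ _ _ hk]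
    have hmem : k ∈ (pvStackSpec prices j).filter (fun i => decide (pvGet prices j < pvGet prices i)) ↔
        (k < j ∧ pvOk prices k j = true) ∧ pvGet prices j < pvGet prices k := by
      rw [List.mem_filter, pvStackSpec_mem]
      simp
    have hokjj : pvOk prices j (j + 1) = true := by
      unfold pvOk
      simp
    by_cases hkj : k < j
    · by_cases hok : pvOk prices k j = true
      · by_cases hplt : pvGet prices j < pvGet prices k
        · rw [if_pos (hmem.mpr ⟨⟨hkj, hok⟩, hplt⟩)]
          have hok1 : pvOk prices k (j + 1) = false := by
            rw [pvOk_succ prices k j hkj hj, hok]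
            simp
            omega
          rw [if_pos ⟨by omega, hok1⟩, pvVal_resolved prices j k hkj hj hok hplt]
        · rw [if_neg (fun hm => hplt (hmem.mp hm).2)]
          have hok1 : pvOk prices k (j + 1) = true := by
            rw [pvOk_succ prices k j hkj hj, hok]
            simp
            omega
          simp [hok, hok1]
      · have hnm : k ∉ (pvStackSpec prices j).filter (fun i => decide (pvGet prices j < pvGet prices i)) := by
          rw [hmem]; tauto
        rw [if_neg hnm]
        have hokf : pvOk prices k j = false := by
          cases h : pvOk prices k j
          · rfl
          · exact absurd h hok
        have hok1 : pvOk prices k (j + 1) = false := by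
          rw [pvOk_succ prices k j hkj hj, hokf]
          simp
        rw [if_pos ⟨hkj, hokf⟩, if_pos ⟨(show k < j + 1 by omega), hok1⟩]
    · have hnm : k ∉ (pvStackSpec prices j).filter (fun i => decide (pvGet prices j < pvGet prices i)) := by
        rw [hmem]; tauto
      rw [if_neg hnm]
      by_cases hkj1 : k = j
      · subst hkj1
        simp [hokjj]
      · have h1 : ¬ (k < j + 1 ∧ pvOk prices k (j + 1) = false) := by
          intro h
          exact hkj1 (by omega)
        have h2 : ¬ (k < j ∧ pvOk prices k j = false) := by
          intro h
          exact hkj h.1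
        rw [if_neg h1, if_neg h2]

theorem pvMainLoop_spec (prices : List Int) (rest : List Int) (j : Nat)
    (hrest : rest = prices.drop j) (hj : j ≤ prices.length) :
    pvMainLoop prices rest j (pvStackSpec prices j) (pvAnsSpec prices j) =
      (pvStackSpec prices prices.length, pvAnsSpec prices prices.length) := by
  induction rest generalizing j with
  | nil =>
    have hge : prices.length ≤ j := by
      by_contra h
      push_neg at h
      have hd := List.drop_eq_getElem_cons (l := prices) h
      rw [← hrest] at hd
      exact List.cons_ne_nil _ _ hd.symm
    have hjn : j = prices.length := le_antisymm hj hge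
    subst hjn
    rfl
  | cons p r ih =>
    have hjlt : j < prices.length := by
      by_contra h
      push_neg at h
      rw [List.drop_eq_nil_of_le h] at hrest
      exact List.cons_ne_nil _ _ hrest
    have hd := List.drop_eq_getElem_cons (l := prices) hjlt
    rw [hd] at hrest
    have hpj : p = pvGet prices j := by
      rw [(List.cons.injEq _ _ _ _).mp hrest |>.1]
      simp [pvGet, List.getD_eq_getElem?_getD, List.getElem?_eq_getElem hjlt]
    have hr : r = prices.drop (j + 1) := ((List.cons.injEq _ _ _ _).mp hrest).2
    have hstep : pvPopDrop prices p j (pvStackSpec prices j) (pvAnsSpec prices j) =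
        ((pvStackSpec prices j).filter (fun i => !(decide (p < pvGet prices i))),
          pvAnsSpec prices (j + 1)) := by
      rw [pvPopDrop_spec prices p j _ _ (pvStackSpec_pairwise prices j (le_of_lt hjlt))]
      rw [hpj, pvAnsSpec_succ prices j hjlt]
    have hcons : j :: (pvStackSpec prices j).filter (fun i => !(decide (p < pvGet prices i))) =
        pvStackSpec prices (j + 1) := by
      rw [hpj, pvStackSpec_succ prices j hjlt]
    rw [pvMainLoop, hstep]
    simp only
    rw [hcons]
    exact ih (j + 1) hr (by omega)

theorem pvAnsSpec_zero (prices : List Int) :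
    pvAnsSpec prices 0 = List.replicate prices.length (0 : Int) := by
  unfold pvAnsSpec
  rw [List.map_congr_left (g := fun _ => (0 : Int)) (by intro i _; simp)]
  simp [List.map_const']

theorem solution_length (prices : List Int) : (solution prices).length = prices.length := by
  induction prices with
  | nil => rfl
  | cons q rest ih => simp [solution, ih]

theorem solution_getD (prices : List Int) (k : Nat) (hk : k < prices.length) :
    (solution prices).getD k 0 = pvVal prices k := by
  induction prices generalizing k with
  | nil => simp at hk
  | cons q rest ih =>
    cases k with
    | zero => simp [solution, pvVal, pvGet]
    | succ m =>
      have hm : m < rest.length := by simp at hk; omega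
      simp only [solution, List.getD_cons_succ]
      rw [ih m hm]
      unfold pvVal pvGet
      simp

theorem pvMainLoop_run (prices : List Int) :
    pvMainLoop prices prices 0 [] (List.replicate prices.length 0) =
      (pvStackSpec prices prices.length, pvAnsSpec prices prices.length) := by
  have h0 : pvStackSpec prices 0 = [] := rfl
  rw [← h0, ← pvAnsSpec_zero prices]
  exact pvMainLoop_spec prices prices 0 rfl (Nat.zero_le _)

-- ===== VERDICT (by name: the statement is the Claim_ definition above) =====
theorem solution_spec : Claim_equal_solution := by
  unfold Claim_equal_solution Spec_solution
  intro prices _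
  have halt : solution_alt prices =
      (pvStackSpec prices prices.length).foldl
        (fun a i => a.set i ((prices.length : Int) - 1 - (i : Int)))
        (pvAnsSpec prices prices.length) := by
    simp only [solution_alt, pvMainLoop_run]
  rw [halt]
  apply pvListExt
  · rw [solution_length, pvSetFold_length, pvAnsSpec_length]
  · intro k hk
    rw [solution_length] at hk
    rw [solution_getD prices k hk,
      pvSetFold_getD (fun i => (prices.length : Int) - 1 - (i : Int)) _ _ _
        (by rw [pvAnsSpec_length]; exact hk)]
    by_cases hmem : k ∈ pvStackSpec prices prices.length
    · rw [if_pos hmem]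
      have hok := (pvStackSpec_mem prices prices.length k).mp hmem
      exact pvVal_unresolved prices k hk hok.2
    · rw [if_neg hmem]
      have hnok : pvOk prices k prices.length = false := by
        cases h : pvOk prices k prices.length
        · rfl
        · exact absurd ((pvStackSpec_mem prices prices.length k).mpr ⟨hk, h⟩) hmem
      rw [pvAnsSpec_getD _ _ _ hk, if_pos ⟨hk, hnok⟩]
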